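-- pv_equiv track=rewrite | github.com/weiminn/IS102 | Project 1/Q3/q3.py | ttsum
-- ===== SOURCE A (Python) =====
-- def ttsum(nums, sum):
--   table = dict()
--   arr = []
--
--   for i in range(0, len(nums)):
--     if nums[i] not in table:
--       table[nums[i]] = [i]
--     else:
--       table[nums[i]] += [i]
--
--   for i in range(0, len(nums)):
--     sub = sum - nums[i]
--     if sub in table:
--       for s in table[sub]:
--         if s > i:
--           arr.append([i, s])
--
--   for i in range(0, len(nums)):
--     sub = sum - nums[i]
--     for j in range(i+1, len(nums)):
--       sub2 = sub - nums[j]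
--       if sub2 in table:
--           for s in table[sub2]:
--             if s > j:
--               arr.append([i, j, s])
--   return arr
-- ===== SOURCE B (Python) =====
-- def ttsum(nums, sum):
--     n = len(nums)
--     res = [[i, s] for i in range(n) for s in range(i + 1, n)
--            if nums[i] + nums[s] == sum]
--     res += [[i, j, s] for i in range(n) for j in range(i + 1, n) for s in range(j + 1, n)
--             if nums[i] + nums[j] + nums[s] == sum]
--     return res
-- ===== Notes on version B (the rewrite author's own statement) =====
-- stated objective: simpler
-- what changed: B drops A's value-to-indices hash table entirely and emits the same pairs and triples by direct nested index comprehensions testing nums[i]+nums[s]==sum (resp. the triple sum) for i<s (resp. i<j<s).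
import Mathlib
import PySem

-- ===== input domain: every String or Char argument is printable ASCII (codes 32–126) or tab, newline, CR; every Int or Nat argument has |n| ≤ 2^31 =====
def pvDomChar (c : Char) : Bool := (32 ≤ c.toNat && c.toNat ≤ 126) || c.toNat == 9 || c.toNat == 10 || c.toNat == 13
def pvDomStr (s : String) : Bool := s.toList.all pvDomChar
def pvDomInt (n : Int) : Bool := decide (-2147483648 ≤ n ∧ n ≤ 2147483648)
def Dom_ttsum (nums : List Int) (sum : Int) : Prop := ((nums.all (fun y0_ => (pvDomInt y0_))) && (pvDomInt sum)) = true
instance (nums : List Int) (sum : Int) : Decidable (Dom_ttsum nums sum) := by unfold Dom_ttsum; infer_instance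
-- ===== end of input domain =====

-- B drops A's value-to-indices hash table and produces the same pairs/triples by direct nested index comprehensions testing the sum; simpler, no speed claim.

-- ===== PORT A =====
def ttsum (nums : List Int) (sum : Int) : List (List Int) :=
  let n : Int := nums.length
  let table : PySem.Dict Int (List Int) :=
    (PySem.List.pyRange 0 n).foldl (fun t i =>
      match t.get? (PySem.List.pyGetD nums i 0) with
      | none => t.insert (PySem.List.pyGetD nums i 0) [i]
      | some l => t.insert (PySem.List.pyGetD nums i 0) (l ++ [i])) (PySem.Dict.mk [])
  let arr : List (List Int) :=
    (PySem.List.pyRange 0 n).foldl (fun arr i =>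
      let sub := sum - PySem.List.pyGetD nums i 0
      match table.get? sub with
      | none => arr
      | some l => l.foldl (fun arr s => if s > i then arr ++ [[i, s]] else arr) arr) []
  (PySem.List.pyRange 0 n).foldl (fun arr i =>
    let sub := sum - PySem.List.pyGetD nums i 0
    (PySem.List.pyRange (i + 1) n).foldl (fun arr j =>
      let sub2 := sub - PySem.List.pyGetD nums j 0
      match table.get? sub2 with
      | none => arr
      | some l => l.foldl (fun arr s => if s > j then arr ++ [[i, j, s]] else arr) arr) arr) arr

-- ===== PORT B =====
def ttsum_alt (nums : List Int) (sum : Int) : List (List Int) :=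
  let n : Int := nums.length
  let res : List (List Int) :=
    (PySem.List.pyRange 0 n).foldl (fun res i =>
      (PySem.List.pyRange (i + 1) n).foldl (fun res s =>
        if PySem.List.pyGetD nums i 0 + PySem.List.pyGetD nums s 0 = sum
        then res ++ [[i, s]] else res) res) []
  (PySem.List.pyRange 0 n).foldl (fun res i =>
    (PySem.List.pyRange (i + 1) n).foldl (fun res j =>
      (PySem.List.pyRange (j + 1) n).foldl (fun res s =>
        if PySem.List.pyGetD nums i 0 + PySem.List.pyGetD nums j 0 + PySem.List.pyGetD nums s 0 = sum
        then res ++ [[i, j, s]] else res) res) res) res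

-- ===== PRECONDITION & SPEC =====
def Spec_ttsum (nums : List Int) (sum : Int) (out : List (List Int)) : Prop := out = ttsum_alt nums sum
instance (nums : List Int) (sum : Int) (out : List (List Int)) : Decidable (Spec_ttsum nums sum out) := by unfold Spec_ttsum; infer_instance

-- ===== CLAIM (what is proved, stated in full; the proofs are below) =====
def Claim_equal_ttsum : Prop := ∀ (nums : List Int) (sum : Int), Dom_ttsum nums sum → Spec_ttsum nums sum (ttsum nums sum)

-- ===== LEMMAS AND PROOFS =====

-- the filter of indices of nums (drawn from L) whose value is v
def occOf (nums : List Int) (v : Int) (L : List Int) : List Int :=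
  L.filter (fun i => decide (PySem.List.pyGetD nums i 0 = v))

-- characterization of A's table after the building fold
lemma tableFold_get? (nums : List Int) (v : Int) :
    ∀ (L : List Int) (d : PySem.Dict Int (List Int)),
      ((L.foldl (fun t i =>
        match t.get? (PySem.List.pyGetD nums i 0) with
        | none => t.insert (PySem.List.pyGetD nums i 0) [i]
        | some l => t.insert (PySem.List.pyGetD nums i 0) (l ++ [i])) d).get? v) =
      (match d.get? v with
       | some l => some (l ++ occOf nums v L)
       | none => if occOf nums v L = [] then none else some (occOf nums v L)) := by
  intro L
  induction L with
  | nil => intro d; cases h : d.get? v <;> simp [occOf, h]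
  | cons i L ih =>
    intro d
    simp only [List.foldl_cons]
    by_cases hv : PySem.List.pyGetD nums i 0 = v
    · rw [hv]
      cases h : d.get? v with
      | none =>
        rw [ih, PySem.Dict.get?_insert_self]
        simp [occOf, hv]
      | some l =>
        rw [ih, PySem.Dict.get?_insert_self]
        simp [occOf, hv]
    · have hne : v ≠ PySem.List.pyGetD nums i 0 := fun h => hv h.symm
      cases h : d.get? (PySem.List.pyGetD nums i 0) with
      | none =>
        rw [ih, PySem.Dict.get?_insert_of_ne _ _ hne]
        simp [occOf, hv]
      | some l =>
        rw [ih, PySem.Dict.get?_insert_of_ne _ _ hne]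
        simp [occOf, hv]

-- indices of value v that exceed a threshold t are exactly the indices of v in range (t+1, n)
lemma occ_filter_gt (nums : List Int) (n v t : Int) (h0 : 0 ≤ t) (hn : t < n) :
    (occOf nums v (PySem.List.pyRange 0 n)).filter (fun s => decide (s > t)) =
      occOf nums v (PySem.List.pyRange (t + 1) n) := by
  unfold occOf
  rw [List.filter_filter]
  rw [PySem.List.pyRange_one_append 0 (t + 1) n (by omega) (by omega)]
  rw [List.filter_append]
  have h1 : (PySem.List.pyRange 0 (t + 1)).filter
      (fun a => decide (a > t) && decide (PySem.List.pyGetD nums a 0 = v)) = [] := by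
    rw [List.filter_eq_nil_iff]
    intro a ha
    have := PySem.List.mem_pyRange_one.mp ha
    simp only [Bool.and_eq_true, decide_eq_true_eq, not_and]
    intro hgt
    omega
  have h2 : (PySem.List.pyRange (t + 1) n).filter
      (fun a => decide (a > t) && decide (PySem.List.pyGetD nums a 0 = v)) =
      (PySem.List.pyRange (t + 1) n).filter (fun i => decide (PySem.List.pyGetD nums i 0 = v)) := by
    apply List.filter_congr
    intro a ha
    have := PySem.List.mem_pyRange_one.mp ha
    have hgt : a > t := by omega
    simp [hgt]
  rw [h1, h2, List.nil_append]

-- per-i chunk of pair results, and per-(i,j) chunk of triple results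
def pairChunk (nums : List Int) (sum i : Int) : List (List Int) :=
  (occOf nums (sum - PySem.List.pyGetD nums i 0)
    (PySem.List.pyRange (i + 1) (nums.length : Int))).map (fun s => [i, s])

def tripChunk (nums : List Int) (sum i j : Int) : List (List Int) :=
  (occOf nums (sum - PySem.List.pyGetD nums i 0 - PySem.List.pyGetD nums j 0)
    (PySem.List.pyRange (j + 1) (nums.length : Int))).map (fun s => [i, j, s])

-- A's lookup-then-scan step equals appending the chunk of hits above the threshold
lemma matchA (nums : List Int) (v thr : Int) (g : Int → List Int) (arr : List (List Int))
    (h0 : 0 ≤ thr) (hn : thr < (nums.length : Int)) :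
    (match (List.foldl
          (fun t i =>
            match t.get? (PySem.List.pyGetD nums i 0) with
            | none => t.insert (PySem.List.pyGetD nums i 0) [i]
            | some l => t.insert (PySem.List.pyGetD nums i 0) (l ++ [i]))
          (PySem.Dict.mk []) (PySem.List.pyRange 0 (nums.length : Int))).get? v with
     | none => arr
     | some l => List.foldl (fun arr s => if s > thr then arr ++ [g s] else arr) arr l) =
    arr ++ (occOf nums v (PySem.List.pyRange (thr + 1) (nums.length : Int))).map g := by
  rw [tableFold_get? nums v]
  have hmk : (PySem.Dict.mk ([] : List (Int × List Int))).get? v = none := rfl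
  rw [hmk]
  rw [← occ_filter_gt nums (nums.length : Int) v thr h0 hn]
  by_cases hocc : occOf nums v (PySem.List.pyRange 0 (nums.length : Int)) = []
  · rw [if_pos hocc, hocc]
    simp
  · rw [if_neg hocc]
    have hfold := PySem.List.foldl_append_if (fun s => decide (s > thr)) g
      (occOf nums v (PySem.List.pyRange 0 (nums.length : Int))) arr
    simp only [decide_eq_true_eq] at hfold
    exact hfold

-- B's direct sum test over a list of candidate indices equals the chunk of occurrences of sm - a
lemma foldl_sumtest (nums : List Int) (a sm : Int) (g : Int → List Int) :
    ∀ (L : List Int) (res : List (List Int)),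
      L.foldl (fun res s =>
        if a + PySem.List.pyGetD nums s 0 = sm then res ++ [g s] else res) res =
      res ++ (occOf nums (sm - a) L).map g := by
  intro L
  induction L with
  | nil => intro res; simp [occOf]
  | cons s L ih =>
    intro res
    by_cases h : PySem.List.pyGetD nums s 0 = sm - a
    · have hc : a + PySem.List.pyGetD nums s 0 = sm := by omega
      simp only [List.foldl_cons, if_pos hc]
      rw [ih]
      simp [occOf, h]
    · have hc : ¬ (a + PySem.List.pyGetD nums s 0 = sm) := by omega
      simp only [List.foldl_cons, if_neg hc, ih, occOf, List.filter_cons, h, decide_false]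
      simp

-- ===== VERDICT (by name: the statement is the Claim_ definition above) =====
theorem ttsum_spec : Claim_equal_ttsum := by
  intro nums sum _
  unfold Spec_ttsum ttsum ttsum_alt
  dsimp only
  -- A side: pairs phase
  rw [PySem.List.foldl_congr_mem (PySem.List.pyRange 0 (nums.length : Int)) _
    (fun arr i => arr ++ pairChunk nums sum i) []
    (fun acc i hi => by
      have hb := PySem.List.mem_pyRange_one.mp hi
      exact matchA nums _ i (fun s => [i, s]) acc hb.1 hb.2)]
  rw [PySem.List.foldl_append_eq_flatMap]
  -- A side: triples phase
  rw [PySem.List.foldl_congr_mem (PySem.List.pyRange 0 (nums.length : Int)) _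
    (fun arr i => arr ++ (PySem.List.pyRange (i + 1) (nums.length : Int)).flatMap (tripChunk nums sum i)) _
    (fun acc i hi => by
      have hbi := PySem.List.mem_pyRange_one.mp hi
      rw [PySem.List.foldl_congr_mem (PySem.List.pyRange (i + 1) (nums.length : Int)) _
        (fun arr j => arr ++ tripChunk nums sum i j) acc
        (fun acc2 j hj => by
          have hbj := PySem.List.mem_pyRange_one.mp hj
          exact matchA nums _ j (fun s => [i, j, s]) acc2 (by omega) hbj.2)]
      exact PySem.List.foldl_append_eq_flatMap _ _ _)]
  rw [PySem.List.foldl_append_eq_flatMap]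
  -- B side: pairs phase
  rw [PySem.List.foldl_congr_mem (PySem.List.pyRange 0 (nums.length : Int)) _
    (fun res i => res ++ pairChunk nums sum i) []
    (fun acc i _ => by
      have h := foldl_sumtest nums (PySem.List.pyGetD nums i 0) sum (fun s => [i, s])
        (PySem.List.pyRange (i + 1) (nums.length : Int)) acc
      rw [h]; rfl)]
  rw [PySem.List.foldl_append_eq_flatMap]
  -- B side: triples phase
  rw [PySem.List.foldl_congr_mem (PySem.List.pyRange 0 (nums.length : Int)) _
    (fun res i => res ++ (PySem.List.pyRange (i + 1) (nums.length : Int)).flatMap (tripChunk nums sum i)) _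
    (fun acc i _ => by
      rw [PySem.List.foldl_congr_mem (PySem.List.pyRange (i + 1) (nums.length : Int)) _
        (fun res j => res ++ tripChunk nums sum i j) acc
        (fun acc2 j _ => by
          have h := foldl_sumtest nums
            (PySem.List.pyGetD nums i 0 + PySem.List.pyGetD nums j 0) sum (fun s => [i, j, s])
            (PySem.List.pyRange (j + 1) (nums.length : Int)) acc2
          rw [h]
          simp only [tripChunk, sub_sub])]
      exact PySem.List.foldl_append_eq_flatMap _ _ _)]
  rw [PySem.List.foldl_append_eq_flatMap]
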